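-- pv_equiv track=rewrite | github.com/harshvermac5/netsub | basic-network-portion.py | get_network_portion
-- ===== SOURCE A (Python) =====
-- def get_network_portion(ip_address, subnet_choice, subnet_prefix=None):
--     # Split the IP address into octets
--     octets = ip_address.split('.')
--
--     # Convert each octet to binary
--     binary_octets = [format(int(octet), '08b') for octet in octets]
--
--     # Concatenate the binary octets
--     binary_ip = ''.join(binary_octets)
--
--     # Determine the subnet prefix based on user choice
--     if subnet_choice == 'classful':
--         # Determine the default subnet prefix based on the IP address class
--         if int(octets[0]) <= 127:
--             subnet_prefix = 8
--         elif int(octets[0]) <= 191: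
--             subnet_prefix = 16
--         else:
--             subnet_prefix = 24
--
--     # Get the network portion based on the chosen subnet prefix
--     network_portion = binary_ip[:subnet_prefix]
--
--     # Pad with zeros to get a complete octet
--     network_portion += '0' * (32 - subnet_prefix)
--
--     # Split the binary network portion into octets
--     network_octets = [network_portion[i:i + 8] for i in range(0, 32, 8)]
--
--     # Convert each octet back to decimal
--     network_address = '.'.join(str(int(octet, 2)) for octet in network_octets)
--
--     return network_address
-- ===== SOURCE B (Python) =====
-- def get_network_portion(ip_address, subnet_choice, subnet_prefix=None):
--     octets = [int(o) for o in ip_address.split('.')]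
--     if subnet_choice == 'classful':
--         subnet_prefix = 8 if octets[0] <= 127 else 16 if octets[0] <= 191 else 24
--     values = (octets + [0, 0, 0, 0])[:4]
--     parts = []
--     for i in range(4):
--         keep = min(max(subnet_prefix - 8 * i, 0), 8)
--         step = 1 << (8 - keep)
--         parts.append(str(values[i] // step * step))
--     return '.'.join(parts)
-- ===== Notes on version B (the rewrite author's own statement) =====
-- stated objective: simpler
-- what changed: Replaces A's 32-character binary-string pipeline (format each octet to '08b', concatenate, slice at the prefix, pad with '0', re-split and re-parse base-2) with direct per-octet integer arithmetic: the octet list is zero-padded to four and each octet is rounded down to a multiple of 2^(8-kept_bits) with // and *, no string of bits ever built.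
-- outside the precondition, e.g. on get_network_portion('256.0.0.0', 'x', 8): A returns '128.0.0.0', B returns '256.0.0.0'; on get_network_portion('1.2.3.255', 'x', -5): A returns '1.2.3.224', B returns '0.0.0.0'
import Mathlib
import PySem

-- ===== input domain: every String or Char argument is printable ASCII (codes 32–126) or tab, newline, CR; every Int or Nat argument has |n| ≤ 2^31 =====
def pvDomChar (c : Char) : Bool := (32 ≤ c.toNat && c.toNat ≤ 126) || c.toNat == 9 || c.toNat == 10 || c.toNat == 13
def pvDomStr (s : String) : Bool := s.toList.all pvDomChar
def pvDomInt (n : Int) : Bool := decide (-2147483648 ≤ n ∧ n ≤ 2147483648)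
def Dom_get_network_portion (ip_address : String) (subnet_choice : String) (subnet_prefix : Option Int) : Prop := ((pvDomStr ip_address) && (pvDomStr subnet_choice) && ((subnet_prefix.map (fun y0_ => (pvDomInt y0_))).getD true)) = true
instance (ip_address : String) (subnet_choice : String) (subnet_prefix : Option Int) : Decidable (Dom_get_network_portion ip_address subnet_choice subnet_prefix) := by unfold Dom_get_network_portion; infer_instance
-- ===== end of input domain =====

-- B replaces A's binary-string build/slice/pad/re-parse pipeline by per-octet integer
-- arithmetic (round each octet down to a multiple of 2^(8-kept bits)); objective: simpler.


-- ===== PORT A =====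
-- format(n, '08b'): binary digits left-padded with '0' to width 8; exact for n ≥ 0
-- (every octet value Pre_ admits is nonnegative).
def pvFormat08b (n : Int) : List Char := PySem.Chars.zfill (Nat.toDigits 2 n.toNat) 8

def get_network_portion (ip_address : String) (subnet_choice : String) (subnet_prefix : Option Int) : String :=
  let octets := PySem.Chars.splitOn ip_address.toList ['.']
  let binary_octets := octets.map (fun o => pvFormat08b ((PySem.Int.ofChars? o).getD 0))
  let binary_ip := binary_octets.flatten   -- ''.join(binary_octets)
  let p : Int :=
    if subnet_choice = "classful" then
      if ((PySem.Int.ofChars? (PySem.List.pyGetD octets 0 [])).getD 0) ≤ 127 then 8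
      else if ((PySem.Int.ofChars? (PySem.List.pyGetD octets 0 [])).getD 0) ≤ 191 then 16
      else 24
    else subnet_prefix.getD 0
  let network_portion := PySem.List.slice binary_ip none (some p) ++ List.replicate ((32 : Int) - p).toNat '0'
  let network_octets := (PySem.List.pyRange 0 32 8).map (fun i => PySem.List.slice network_portion (some i) (some (i + 8)))
  String.ofList (PySem.Chars.join ['.'] (network_octets.map (fun o => PySem.Int.toChars ((PySem.Int.ofCharsBase? o 2).getD 0))))

-- ===== PORT B =====
def get_network_portion_alt (ip_address : String) (subnet_choice : String) (subnet_prefix : Option Int) : String :=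
  let octets := (PySem.Chars.splitOn ip_address.toList ['.']).map (fun o => (PySem.Int.ofChars? o).getD 0)
  let p : Int :=
    if subnet_choice = "classful" then
      if PySem.List.pyGetD octets 0 0 ≤ 127 then 8
      else if PySem.List.pyGetD octets 0 0 ≤ 191 then 16
      else 24
    else subnet_prefix.getD 0
  let values := (octets ++ [0, 0, 0, 0]).take 4   -- (octets + [0,0,0,0])[:4]
  let parts := (PySem.List.pyRange 0 4 1).foldl (fun acc i =>
    let keep := min (max (p - 8 * i) 0) 8
    let step : Int := 1 <<< ((8 : Int) - keep).toNat
    acc ++ [PySem.Int.toChars (PySem.Int.floordiv (PySem.List.pyGetD values i 0) step * step)]) []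
  String.ofList (PySem.Chars.join ['.'] parts)

-- ===== PRECONDITION & SPEC =====
-- Pre_ excludes inputs where A raises (an octet int() cannot parse, a missing or non-int
-- prefix, a prefix reaching past the bits the given octets provide) and, as artefacts of A's
-- string slicing, octet values outside 0..255 (signed/overlong binary strings) and negative
-- prefixes, on which A still returns a value B does not reproduce.
def Pre_get_network_portion (ip_address : String) (subnet_choice : String) (subnet_prefix : Option Int) : Prop :=
  let octets := PySem.Chars.splitOn ip_address.toList ['.']
  1 ≤ octets.length ∧
  (∀ o ∈ octets, (PySem.Int.ofChars? o).isSome = true) ∧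
  (∀ o ∈ octets.take 4, 0 ≤ (PySem.Int.ofChars? o).getD 0 ∧ (PySem.Int.ofChars? o).getD 0 ≤ 255) ∧
  (subnet_choice = "classful" ∨ (subnet_prefix.isSome = true ∧ 0 ≤ subnet_prefix.getD 0)) ∧
  (4 ≤ octets.length ∨
    (if subnet_choice = "classful" then
      if (PySem.Int.ofChars? (octets.getD 0 [])).getD 0 ≤ 127 then 8
      else if (PySem.Int.ofChars? (octets.getD 0 [])).getD 0 ≤ 191 then 16
      else 24
     else subnet_prefix.getD 0) < 8 * octets.length + 8)
instance (ip_address : String) (subnet_choice : String) (subnet_prefix : Option Int) : Decidable (Pre_get_network_portion ip_address subnet_choice subnet_prefix) := by unfold Pre_get_network_portion; infer_instance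

def pvWitness_get_network_portion : String × String × Option Int := ("192.168.1.10", "manual", some 24)

def Spec_get_network_portion (ip_address : String) (subnet_choice : String) (subnet_prefix : Option Int) (out : String) : Prop := out = get_network_portion_alt ip_address subnet_choice subnet_prefix
instance (ip_address : String) (subnet_choice : String) (subnet_prefix : Option Int) (out : String) : Decidable (Spec_get_network_portion ip_address subnet_choice subnet_prefix out) := by unfold Spec_get_network_portion; infer_instance

-- ===== CLAIM (what is proved, stated in full; the proofs are below) =====
def Claim_equal_get_network_portion : Prop := ∀ (ip_address : String) (subnet_choice : String) (subnet_prefix : Option Int), Dom_get_network_portion ip_address subnet_choice subnet_prefix → Pre_get_network_portion ip_address subnet_choice subnet_prefix → Spec_get_network_portion ip_address subnet_choice subnet_prefix (get_network_portion ip_address subnet_choice subnet_prefix)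

-- ===== LEMMAS AND PROOFS =====

-- decimal values 0..255 format to at most 8 binary digits
set_option maxRecDepth 8192 in
theorem pv_toDigits_len : ∀ m < 256, (Nat.toDigits 2 m).length ≤ 8 := by decide

theorem pv_len_format08b (n : Int) (h0 : 0 ≤ n) (h1 : n ≤ 255) : (pvFormat08b n).length = 8 := by
  have : n.toNat < 256 := by omega
  have := pv_toDigits_len n.toNat this
  simp only [pvFormat08b, PySem.Chars.length_zfill]
  omega

-- per-octet bridge, as a boolean table over the 256 × 9 cases
def pvOctetCheck (m q : Nat) : Bool :=
  (PySem.Int.ofCharsBase? ((pvFormat08b (m : Int)).take q ++ List.replicate (8 - q) '0') 2).getD 0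
    == PySem.Int.floordiv (m : Int) ((1 : Int) <<< (8 - q)) * ((1 : Int) <<< (8 - q))
set_option maxRecDepth 100000 in
theorem pv_octet_check : ((List.range 256).all fun m => (List.range 9).all fun q => pvOctetCheck m q) = true := by decide

-- per-octet bridge: base-2-parse(take q of the 8 bits, zero-padded back to 8) is
-- exactly "round down to a multiple of 2^(8-q)"
theorem pv_octet_bridge (m q : Nat) (hm : m < 256) (hq : q ≤ 8) :
    (PySem.Int.ofCharsBase? ((pvFormat08b (m : Int)).take q ++ List.replicate (8 - q) '0') 2).getD 0
      = PySem.Int.floordiv (m : Int) ((1 : Int) <<< (8 - q)) * ((1 : Int) <<< (8 - q)) := by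
  have h := pv_octet_check
  rw [List.all_eq_true] at h
  have h2 := h m (by simpa using hm)
  rw [List.all_eq_true] at h2
  have h3 := h2 q (by simp; omega)
  exact eq_of_beq h3

-- the truncated-and-padded bit string splits into four independently masked octets
theorem pv_seg (A B C D : List Char) (hA : A.length = 8) (hB : B.length = 8)
    (hC : C.length = 8) (hD : D.length = 8) (P : Nat) :
    (A ++ B ++ C ++ D).take P ++ List.replicate (32 - P) '0'
      = (A.take (min P 8) ++ List.replicate (8 - P) '0')
        ++ ((B.take (min (P - 8) 8) ++ List.replicate (8 - (P - 8)) '0')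
        ++ ((C.take (min (P - 16) 8) ++ List.replicate (8 - (P - 16)) '0')
        ++ (D.take (min (P - 24) 8) ++ List.replicate (8 - (P - 24)) '0'))) := by
  have tA : A.take (min P 8) = A.take P := by
    rcases Nat.le_total P 8 with h | h
    · rw [Nat.min_eq_left h]
    · rw [Nat.min_eq_right h, List.take_of_length_le (by omega), List.take_of_length_le (by omega)]
  have tB : B.take (min (P-8) 8) = B.take (P-8) := by
    rcases Nat.le_total (P-8) 8 with h | h
    · rw [Nat.min_eq_left h]
    · rw [Nat.min_eq_right h, List.take_of_length_le (by omega), List.take_of_length_le (by omega)]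
  have tC : C.take (min (P-16) 8) = C.take (P-16) := by
    rcases Nat.le_total (P-16) 8 with h | h
    · rw [Nat.min_eq_left h]
    · rw [Nat.min_eq_right h, List.take_of_length_le (by omega), List.take_of_length_le (by omega)]
  have tD : D.take (min (P-24) 8) = D.take (P-24) := by
    rcases Nat.le_total (P-24) 8 with h | h
    · rw [Nat.min_eq_left h]
    · rw [Nat.min_eq_right h, List.take_of_length_le (by omega), List.take_of_length_le (by omega)]
  rw [tA, tB, tC, tD]
  rw [List.take_append, List.take_append, List.take_append]
  simp only [List.length_append, hA, hB, hC]
  norm_num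
  by_cases h1 : P ≤ 8
  · have e1 : P - 8 = 0 := by omega
    have e2 : P - 16 = 0 := by omega
    have e3 : P - 24 = 0 := by omega
    rw [e1, e2, e3]
    simp only [List.take_zero, List.nil_append]
    have hs : (32:Nat) - P = (8 - P) + (8 + 8 + 8) := by omega
    rw [hs, List.replicate_add, List.replicate_add, List.replicate_add]
    simp
  · by_cases h2 : P ≤ 16
    · have e1 : (8:Nat) - P = 0 := by omega
      have e2 : P - 16 = 0 := by omega
      have e3 : P - 24 = 0 := by omega
      have hs : (32:Nat) - P = (8 - (P - 8)) + (8 + 8) := by omega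
      rw [e1, e2, e3, hs, List.replicate_add, List.replicate_add]
      simp
    · by_cases h3 : P ≤ 24
      · have eB : B.take (P - 8) = B := List.take_of_length_le (by omega)
        have e1 : (8:Nat) - P = 0 := by omega
        have e2 : (8:Nat) - (P - 8) = 0 := by omega
        have e3 : P - 24 = 0 := by omega
        have hs : (32:Nat) - P = (8 - (P - 16)) + 8 := by omega
        rw [eB, e1, e2, e3, hs, List.replicate_add]
        simp
      · have eB : B.take (P - 8) = B := List.take_of_length_le (by omega)
        have eC : C.take (P - 16) = C := List.take_of_length_le (by omega)
        have e1 : (8:Nat) - P = 0 := by omega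
        have e2 : (8:Nat) - (P - 8) = 0 := by omega
        have e3 : (8:Nat) - (P - 16) = 0 := by omega
        have e4 : (32:Nat) - P = 8 - (P - 24) := by omega
        rw [eB, eC, e1, e2, e3, e4]
        simp


-- slices of a block list: each 8-aligned slice picks one block
theorem pv_block (G0 G1 G2 G3 T : List Char) (h0 : G0.length = 8) (h1 : G1.length = 8)
    (h2 : G2.length = 8) (h3 : G3.length = 8) :
    PySem.List.slice (G0 ++ (G1 ++ (G2 ++ (G3 ++ T)))) (some 0) (some (0+8)) = G0 ∧
    PySem.List.slice (G0 ++ (G1 ++ (G2 ++ (G3 ++ T)))) (some 8) (some (8+8)) = G1 ∧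
    PySem.List.slice (G0 ++ (G1 ++ (G2 ++ (G3 ++ T)))) (some 16) (some (16+8)) = G2 ∧
    PySem.List.slice (G0 ++ (G1 ++ (G2 ++ (G3 ++ T)))) (some 24) (some (24+8)) = G3 := by
  refine ⟨?_, ?_, ?_, ?_⟩ <;>
    rw [PySem.List.slice_toNat _ (by norm_num) (by norm_num)] <;>
    simp only [Int.toNat_zero, show Int.toNat 8 = 8 by decide, show Int.toNat 16 = 16 by decide,
      show Int.toNat 24 = 24 by decide, show Int.toNat (0+8) = 8 by decide,
      show Int.toNat (8+8) = 16 by decide, show Int.toNat (16+8) = 24 by decide,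
      show Int.toNat (24+8) = 32 by decide, List.drop_zero]
  · rw [show (8:Nat) - 0 = 8 by norm_num, ← h0, List.take_left]
  · rw [show (16:Nat) - 8 = 8 by norm_num, ← h0, List.drop_left, h0, ← h1, List.take_left]
  · rw [show (24:Nat) - 16 = 8 by norm_num,
      show (16:Nat) = 8 + 8 by norm_num, ← List.drop_drop, ← h0, List.drop_left]
    rw [h0, ← h1, List.drop_left, h1, ← h2, List.take_left]
  · rw [show (32:Nat) - 24 = 8 by norm_num,
      show (24:Nat) = 8 + 16 by norm_num, ← List.drop_drop]
    rw [show (16:Nat) = 8 + 8 by norm_num, ← List.drop_drop, ← h0, List.drop_left]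
    rw [h0, ← h1, List.drop_left, h1, ← h2, List.drop_left, h2, ← h3, List.take_left]

theorem pv_core (n0 n1 n2 n3 : Int) (restC : List Char) (restV : List Int) (P : Nat)
    (hb0 : 0 ≤ n0 ∧ n0 ≤ 255) (hb1 : 0 ≤ n1 ∧ n1 ≤ 255)
    (hb2 : 0 ≤ n2 ∧ n2 ≤ 255) (hb3 : 0 ≤ n3 ∧ n3 ≤ 255) :
    String.ofList (PySem.Chars.join ['.']
      (List.map (fun o => PySem.Int.toChars ((PySem.Int.ofCharsBase? o 2).getD 0))
        (List.map (fun i => PySem.List.slice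
          (PySem.List.slice (pvFormat08b n0 ++ (pvFormat08b n1 ++ (pvFormat08b n2 ++ (pvFormat08b n3 ++ restC)))) none (some ((P:Nat):Int))
            ++ List.replicate ((32 - ((P:Nat):Int)).toNat) '0') (some i) (some (i + 8)))
          (PySem.List.pyRange 0 32 8))))
    = String.ofList (PySem.Chars.join ['.']
        (List.foldl (fun acc i => acc ++
          [PySem.Int.toChars (PySem.Int.floordiv (PySem.List.pyGetD (n0 :: n1 :: n2 :: n3 :: restV) i 0)
              ((1 <<< ((8 - min (max (((P:Nat):Int) - 8 * i) 0) 8).toNat) : Nat) : Int) *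
            ((1 <<< ((8 - min (max (((P:Nat):Int) - 8 * i) 0) 8).toNat) : Nat) : Int))])
          [] (PySem.List.pyRange 0 4))) := by
  have hF0 : (pvFormat08b n0).length = 8 := pv_len_format08b _ hb0.1 hb0.2
  have hF1 : (pvFormat08b n1).length = 8 := pv_len_format08b _ hb1.1 hb1.2
  have hF2 : (pvFormat08b n2).length = 8 := pv_len_format08b _ hb2.1 hb2.2
  have hF3 : (pvFormat08b n3).length = 8 := pv_len_format08b _ hb3.1 hb3.2
  have hr32 : PySem.List.pyRange 0 32 8 = [0, 8, 16, 24] := by decide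
  have hr4 : PySem.List.pyRange 0 4 = [0, 1, 2, 3] := by decide
  rw [hr32, hr4, PySem.List.foldl_append_singleton_eq_map]
  simp only [List.map_cons, List.map_nil, List.nil_append]
  rw [PySem.List.slice_to _ (Int.natCast_nonneg P)]
  rw [show ((P:Int)).toNat = P from Int.toNat_natCast P]
  rw [show ((32:Int) - (P:Int)).toNat = 32 - P by omega]
  rw [show pvFormat08b n0 ++ (pvFormat08b n1 ++ (pvFormat08b n2 ++ (pvFormat08b n3 ++ restC)))
      = (pvFormat08b n0 ++ pvFormat08b n1 ++ pvFormat08b n2 ++ pvFormat08b n3) ++ restC by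
    simp [List.append_assoc]]
  rw [List.take_append]
  rw [show (pvFormat08b n0 ++ pvFormat08b n1 ++ pvFormat08b n2 ++ pvFormat08b n3).length = 32 by
    simp [hF0, hF1, hF2, hF3]]
  rw [show ((pvFormat08b n0 ++ pvFormat08b n1 ++ pvFormat08b n2 ++ pvFormat08b n3).take P
        ++ List.take (P - 32) restC) ++ List.replicate (32 - P) '0'
      = ((pvFormat08b n0 ++ pvFormat08b n1 ++ pvFormat08b n2 ++ pvFormat08b n3).take P
        ++ List.replicate (32 - P) '0') ++ List.take (P - 32) restC by
    by_cases h : P ≤ 32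
    · rw [show P - 32 = 0 by omega]; simp
    · rw [show (32:Nat) - P = 0 by omega]; simp]
  rw [pv_seg _ _ _ _ hF0 hF1 hF2 hF3 P]
  simp only [List.append_assoc]
  obtain ⟨e0, e1, e2, e3⟩ := pv_block
    ((pvFormat08b n0).take (min P 8) ++ List.replicate (8 - P) '0')
    ((pvFormat08b n1).take (min (P - 8) 8) ++ List.replicate (8 - (P - 8)) '0')
    ((pvFormat08b n2).take (min (P - 16) 8) ++ List.replicate (8 - (P - 16)) '0')
    ((pvFormat08b n3).take (min (P - 24) 8) ++ List.replicate (8 - (P - 24)) '0')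
    (List.take (P - 32) restC)
    (by simp [List.length_take, hF0]; omega) (by simp [List.length_take, hF1]; omega)
    (by simp [List.length_take, hF2]; omega) (by simp [List.length_take, hF3]; omega)
  simp only [List.append_assoc] at e0 e1 e2 e3
  rw [e0, e1, e2, e3]
  simp only [PySem.List.pyGetD_ofNat', List.getD_cons_succ,
    List.getD_cons_zero]
  have hcast : ∀ k : Nat, ((1 <<< k : Nat) : Int) = (1:Int) <<< k := by
    intro k; simp [Nat.shiftLeft_eq, Int.shiftLeft_eq]
  have comp : ∀ (n : Int) (dP : Nat), 0 ≤ n → n ≤ 255 →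
      PySem.Int.toChars ((PySem.Int.ofCharsBase? ((pvFormat08b n).take (min dP 8)
          ++ List.replicate (8 - dP) '0') 2).getD 0)
      = PySem.Int.toChars (PySem.Int.floordiv n
          ((1 <<< ((8 - ((min (dP:Nat) 8 : Nat) : Int)).toNat) : Nat) : Int) *
          ((1 <<< ((8 - ((min (dP:Nat) 8 : Nat) : Int)).toNat) : Nat) : Int)) := by
    intro n dP hge hle
    have hq : min dP 8 ≤ 8 := min_le_right _ _
    have hrepl : (8:Nat) - dP = 8 - min dP 8 := by omega
    have hT : ((8:Int) - ((min dP 8 : Nat):Int)).toNat = 8 - min dP 8 := by omega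
    have hn : n = ((n.toNat : Nat) : Int) := by omega
    rw [hrepl, hT, hcast, hn]
    exact congrArg _ (pv_octet_bridge n.toNat (min dP 8) (by omega) hq)
  have k0 : min (max ((P:Int) - 8 * 0) 0) 8 = ((min P 8 : Nat) : Int) := by omega
  have k1 : min (max ((P:Int) - 8 * 1) 0) 8 = ((min (P - 8) 8 : Nat) : Int) := by omega
  have k2 : min (max ((P:Int) - 8 * 2) 0) 8 = ((min (P - 16) 8 : Nat) : Int) := by omega
  have k3 : min (max ((P:Int) - 8 * 3) 0) 8 = ((min (P - 24) 8 : Nat) : Int) := by omega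
  rw [k0, k1, k2, k3]
  rw [comp n0 P hb0.1 hb0.2, comp n1 (P - 8) hb1.1 hb1.2, comp n2 (P - 16) hb2.1 hb2.2,
    comp n3 (P - 24) hb3.1 hb3.2]


-- parsing an all-zero bit string gives 0
set_option maxRecDepth 2048 in
theorem pv_parse_zeros : ∀ j < 9, (PySem.Int.ofCharsBase? (List.replicate j '0') 2).getD 0 = 0 := by
  decide

theorem pv_div_one (n : Int) : PySem.Int.floordiv n 1 * 1 = n := by
  rw [PySem.Int.floordiv_eq_ediv_of_pos (by norm_num), Int.ediv_one, mul_one]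

theorem pv_zero_div (t : Nat) :
    PySem.Int.floordiv 0 ((1 <<< t : Nat) : Int) * ((1 <<< t : Nat) : Int) = 0 := by
  have hs : (0:Int) < ((1 <<< t : Nat) : Int) := by
    have : 0 < (1 <<< t : Nat) := by simp [Nat.shiftLeft_eq]
    exact_mod_cast this
  rw [PySem.Int.floordiv_eq_ediv_of_pos hs, Int.zero_ediv, zero_mul]

-- parsing the full 8-bit string of an octet value gives it back
theorem pv_parse_full (n : Int) (h0 : 0 ≤ n) (h1 : n ≤ 255) :
    (PySem.Int.ofCharsBase? (pvFormat08b n) 2).getD 0 = n := by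
  have hF : (pvFormat08b n).length = 8 := pv_len_format08b n h0 h1
  have hn : n = ((n.toNat : Nat) : Int) := by omega
  have h := pv_octet_bridge n.toNat 8 (by omega) le_rfl
  rw [← hn] at h
  rw [List.take_of_length_le (by rw [hF])] at h
  simp only [Nat.sub_self, List.replicate_zero, List.append_nil] at h
  rw [show ((1:Int) <<< (0:Nat)) = 1 from by decide] at h
  rw [h]
  exact pv_div_one n

-- slices of a block list whose last block may be short (no trailing tail)
theorem pv_blockE (G0 G1 G2 G3 : List Char) (h0 : G0.length = 8) (h1 : G1.length = 8)
    (h2 : G2.length = 8) (h3 : G3.length ≤ 8) :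
    PySem.List.slice (G0 ++ (G1 ++ (G2 ++ G3))) (some 0) (some (0+8)) = G0 ∧
    PySem.List.slice (G0 ++ (G1 ++ (G2 ++ G3))) (some 8) (some (8+8)) = G1 ∧
    PySem.List.slice (G0 ++ (G1 ++ (G2 ++ G3))) (some 16) (some (16+8)) = G2 ∧
    PySem.List.slice (G0 ++ (G1 ++ (G2 ++ G3))) (some 24) (some (24+8)) = G3 := by
  refine ⟨?_, ?_, ?_, ?_⟩ <;>
    rw [PySem.List.slice_toNat _ (by norm_num) (by norm_num)] <;>
    simp only [Int.toNat_zero, show Int.toNat 8 = 8 by decide, show Int.toNat 16 = 16 by decide,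
      show Int.toNat 24 = 24 by decide, show Int.toNat (0+8) = 8 by decide,
      show Int.toNat (8+8) = 16 by decide, show Int.toNat (16+8) = 24 by decide,
      show Int.toNat (24+8) = 32 by decide, List.drop_zero]
  · rw [show (8:Nat) - 0 = 8 by norm_num, ← h0, List.take_left]
  · rw [show (16:Nat) - 8 = 8 by norm_num, ← h0, List.drop_left, h0, ← h1, List.take_left]
  · rw [show (24:Nat) - 16 = 8 by norm_num,
      show (16:Nat) = 8 + 8 by norm_num, ← List.drop_drop, ← h0, List.drop_left]
    rw [h0, ← h1, List.drop_left, h1, ← h2, List.take_left]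
  · rw [show (32:Nat) - 24 = 8 by norm_num,
      show (24:Nat) = 8 + 16 by norm_num, ← List.drop_drop]
    rw [show (16:Nat) = 8 + 8 by norm_num, ← List.drop_drop, ← h0, List.drop_left]
    rw [h0, ← h1, List.drop_left, h1, ← h2, List.drop_left, h2]
    exact List.take_of_length_le h3

theorem pv_core1 (n0 : Int) (P : Nat) (hb0 : 0 ≤ n0 ∧ n0 ≤ 255) (hPlt : P < 16) :
    String.ofList (PySem.Chars.join ['.']
      (List.map (fun o => PySem.Int.toChars ((PySem.Int.ofCharsBase? o 2).getD 0))
        (List.map (fun i => PySem.List.slice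
          (PySem.List.slice (pvFormat08b n0) none (some ((P:Nat):Int))
            ++ List.replicate ((32 - ((P:Nat):Int)).toNat) '0') (some i) (some (i + 8)))
          (PySem.List.pyRange 0 32 8))))
    = String.ofList (PySem.Chars.join ['.']
        (List.foldl (fun acc i => acc ++
          [PySem.Int.toChars (PySem.Int.floordiv (PySem.List.pyGetD [n0, 0, 0, 0] i 0)
              ((1 <<< ((8 - min (max (((P:Nat):Int) - 8 * i) 0) 8).toNat) : Nat) : Int) *
            ((1 <<< ((8 - min (max (((P:Nat):Int) - 8 * i) 0) 8).toNat) : Nat) : Int))])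
          [] (PySem.List.pyRange 0 4))) := by
  have hF0 : (pvFormat08b n0).length = 8 := pv_len_format08b _ hb0.1 hb0.2
  by_cases h8 : P ≤ 8
  · rw [show PySem.List.slice (pvFormat08b n0) none (some ((P:Nat):Int))
        = PySem.List.slice (pvFormat08b n0 ++ (pvFormat08b 0 ++ (pvFormat08b 0 ++ (pvFormat08b 0 ++ [])))) none (some ((P:Nat):Int)) by
      rw [PySem.List.slice_to _ (Int.natCast_nonneg P), PySem.List.slice_to _ (Int.natCast_nonneg P),
        Int.toNat_natCast]
      exact (List.take_append_of_le_length (by omega)).symm]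
    exact pv_core n0 0 0 0 [] [] P hb0 (by norm_num) (by norm_num) (by norm_num)
  · have hr32 : PySem.List.pyRange 0 32 8 = [0, 8, 16, 24] := by decide
    have hr4 : PySem.List.pyRange 0 4 = [0, 1, 2, 3] := by decide
    rw [hr32, hr4, PySem.List.foldl_append_singleton_eq_map]
    simp only [List.map_cons, List.map_nil, List.nil_append]
    rw [PySem.List.slice_to _ (Int.natCast_nonneg P), Int.toNat_natCast,
      show ((32:Int) - (P:Int)).toNat = 32 - P by omega,
      List.take_of_length_le (by omega),
      show 32 - P = 8 + (8 + (16 - P)) by omega, List.replicate_add, List.replicate_add]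
    obtain ⟨e0, e1, e2, e3⟩ := pv_blockE (pvFormat08b n0) (List.replicate 8 '0')
      (List.replicate 8 '0') (List.replicate (16 - P) '0')
      hF0 (by simp) (by simp) (by simp only [List.length_replicate]; omega)
    rw [e0, e1, e2, e3]
    simp only [PySem.List.pyGetD_ofNat', List.getD_cons_succ,
      List.getD_cons_zero]
    rw [pv_parse_full n0 hb0.1 hb0.2, pv_parse_zeros 8 (by omega), pv_parse_zeros (16 - P) (by omega)]
    rw [show min (max ((P:Int) - 8 * 0) 0) 8 = 8 by omega,
      show min (max ((P:Int) - 8 * 1) 0) 8 = (P:Int) - 8 by omega,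
      show min (max ((P:Int) - 8 * 2) 0) 8 = 0 by omega,
      show min (max ((P:Int) - 8 * 3) 0) 8 = 0 by omega,
      show ((8:Int) - 8).toNat = 0 by decide, show ((8:Int) - 0).toNat = 8 by decide]
    rw [show ((8:Int) - ((P:Int) - 8)).toNat = 16 - P by omega]
    rw [show (1 <<< 0 : Nat) = 1 by decide, Nat.cast_one, pv_div_one n0,
      pv_zero_div (16 - P), pv_zero_div 8]

theorem pv_core2 (n0 n1 : Int) (P : Nat) (hb0 : 0 ≤ n0 ∧ n0 ≤ 255) (hb1 : 0 ≤ n1 ∧ n1 ≤ 255)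
    (hPlt : P < 24) :
    String.ofList (PySem.Chars.join ['.']
      (List.map (fun o => PySem.Int.toChars ((PySem.Int.ofCharsBase? o 2).getD 0))
        (List.map (fun i => PySem.List.slice
          (PySem.List.slice (pvFormat08b n0 ++ pvFormat08b n1) none (some ((P:Nat):Int))
            ++ List.replicate ((32 - ((P:Nat):Int)).toNat) '0') (some i) (some (i + 8)))
          (PySem.List.pyRange 0 32 8))))
    = String.ofList (PySem.Chars.join ['.']
        (List.foldl (fun acc i => acc ++
          [PySem.Int.toChars (PySem.Int.floordiv (PySem.List.pyGetD [n0, n1, 0, 0] i 0)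
              ((1 <<< ((8 - min (max (((P:Nat):Int) - 8 * i) 0) 8).toNat) : Nat) : Int) *
            ((1 <<< ((8 - min (max (((P:Nat):Int) - 8 * i) 0) 8).toNat) : Nat) : Int))])
          [] (PySem.List.pyRange 0 4))) := by
  have hF0 : (pvFormat08b n0).length = 8 := pv_len_format08b _ hb0.1 hb0.2
  have hF1 : (pvFormat08b n1).length = 8 := pv_len_format08b _ hb1.1 hb1.2
  by_cases h16 : P ≤ 16
  · rw [show PySem.List.slice (pvFormat08b n0 ++ pvFormat08b n1) none (some ((P:Nat):Int))
        = PySem.List.slice (pvFormat08b n0 ++ (pvFormat08b n1 ++ (pvFormat08b 0 ++ (pvFormat08b 0 ++ [])))) none (some ((P:Nat):Int)) by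
      rw [PySem.List.slice_to _ (Int.natCast_nonneg P), PySem.List.slice_to _ (Int.natCast_nonneg P),
        Int.toNat_natCast,
        show pvFormat08b n0 ++ (pvFormat08b n1 ++ (pvFormat08b 0 ++ (pvFormat08b 0 ++ [])))
          = (pvFormat08b n0 ++ pvFormat08b n1) ++ (pvFormat08b 0 ++ (pvFormat08b 0 ++ [])) by simp]
      exact (List.take_append_of_le_length (by simp only [List.length_append, hF0, hF1]; omega)).symm]
    exact pv_core n0 n1 0 0 [] [] P hb0 hb1 (by norm_num) (by norm_num)
  · have hr32 : PySem.List.pyRange 0 32 8 = [0, 8, 16, 24] := by decide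
    have hr4 : PySem.List.pyRange 0 4 = [0, 1, 2, 3] := by decide
    rw [hr32, hr4, PySem.List.foldl_append_singleton_eq_map]
    simp only [List.map_cons, List.map_nil, List.nil_append]
    rw [PySem.List.slice_to _ (Int.natCast_nonneg P), Int.toNat_natCast,
      show ((32:Int) - (P:Int)).toNat = 32 - P by omega,
      List.take_of_length_le (by simp [hF0, hF1]; omega),
      show 32 - P = 8 + (24 - P) by omega, List.replicate_add, List.append_assoc]
    obtain ⟨e0, e1, e2, e3⟩ := pv_blockE (pvFormat08b n0) (pvFormat08b n1)
      (List.replicate 8 '0') (List.replicate (24 - P) '0')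
      hF0 hF1 (by simp) (by simp only [List.length_replicate]; omega)
    rw [e0, e1, e2, e3]
    simp only [PySem.List.pyGetD_ofNat', List.getD_cons_succ,
      List.getD_cons_zero]
    rw [pv_parse_full n0 hb0.1 hb0.2, pv_parse_full n1 hb1.1 hb1.2,
      pv_parse_zeros 8 (by omega), pv_parse_zeros (24 - P) (by omega)]
    rw [show min (max ((P:Int) - 8 * 0) 0) 8 = 8 by omega,
      show min (max ((P:Int) - 8 * 1) 0) 8 = 8 by omega,
      show min (max ((P:Int) - 8 * 2) 0) 8 = (P:Int) - 16 by omega,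
      show min (max ((P:Int) - 8 * 3) 0) 8 = 0 by omega,
      show ((8:Int) - 8).toNat = 0 by decide, show ((8:Int) - 0).toNat = 8 by decide]
    rw [show ((8:Int) - ((P:Int) - 16)).toNat = 24 - P by omega]
    rw [show (1 <<< 0 : Nat) = 1 by decide, Nat.cast_one, pv_div_one n0, pv_div_one n1,
      pv_zero_div (24 - P), pv_zero_div 8]

theorem pv_core3 (n0 n1 n2 : Int) (P : Nat) (hb0 : 0 ≤ n0 ∧ n0 ≤ 255) (hb1 : 0 ≤ n1 ∧ n1 ≤ 255)
    (hb2 : 0 ≤ n2 ∧ n2 ≤ 255) (hPlt : P < 32) :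
    String.ofList (PySem.Chars.join ['.']
      (List.map (fun o => PySem.Int.toChars ((PySem.Int.ofCharsBase? o 2).getD 0))
        (List.map (fun i => PySem.List.slice
          (PySem.List.slice (pvFormat08b n0 ++ (pvFormat08b n1 ++ pvFormat08b n2)) none (some ((P:Nat):Int))
            ++ List.replicate ((32 - ((P:Nat):Int)).toNat) '0') (some i) (some (i + 8)))
          (PySem.List.pyRange 0 32 8))))
    = String.ofList (PySem.Chars.join ['.']
        (List.foldl (fun acc i => acc ++
          [PySem.Int.toChars (PySem.Int.floordiv (PySem.List.pyGetD [n0, n1, n2, 0] i 0)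
              ((1 <<< ((8 - min (max (((P:Nat):Int) - 8 * i) 0) 8).toNat) : Nat) : Int) *
            ((1 <<< ((8 - min (max (((P:Nat):Int) - 8 * i) 0) 8).toNat) : Nat) : Int))])
          [] (PySem.List.pyRange 0 4))) := by
  have hF0 : (pvFormat08b n0).length = 8 := pv_len_format08b _ hb0.1 hb0.2
  have hF1 : (pvFormat08b n1).length = 8 := pv_len_format08b _ hb1.1 hb1.2
  have hF2 : (pvFormat08b n2).length = 8 := pv_len_format08b _ hb2.1 hb2.2
  by_cases h24 : P ≤ 24
  · rw [show PySem.List.slice (pvFormat08b n0 ++ (pvFormat08b n1 ++ pvFormat08b n2)) none (some ((P:Nat):Int))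
        = PySem.List.slice (pvFormat08b n0 ++ (pvFormat08b n1 ++ (pvFormat08b n2 ++ (pvFormat08b 0 ++ [])))) none (some ((P:Nat):Int)) by
      rw [PySem.List.slice_to _ (Int.natCast_nonneg P), PySem.List.slice_to _ (Int.natCast_nonneg P),
        Int.toNat_natCast,
        show pvFormat08b n0 ++ (pvFormat08b n1 ++ (pvFormat08b n2 ++ (pvFormat08b 0 ++ [])))
          = (pvFormat08b n0 ++ (pvFormat08b n1 ++ pvFormat08b n2)) ++ (pvFormat08b 0 ++ []) by simp]
      exact (List.take_append_of_le_length (by simp only [List.length_append, hF0, hF1, hF2]; omega)).symm]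
    exact pv_core n0 n1 n2 0 [] [] P hb0 hb1 hb2 (by norm_num)
  · have hr32 : PySem.List.pyRange 0 32 8 = [0, 8, 16, 24] := by decide
    have hr4 : PySem.List.pyRange 0 4 = [0, 1, 2, 3] := by decide
    rw [hr32, hr4, PySem.List.foldl_append_singleton_eq_map]
    simp only [List.map_cons, List.map_nil, List.nil_append]
    rw [PySem.List.slice_to _ (Int.natCast_nonneg P), Int.toNat_natCast,
      show ((32:Int) - (P:Int)).toNat = 32 - P by omega,
      List.take_of_length_le (by simp [hF0, hF1, hF2]; omega)]
    obtain ⟨e0, e1, e2, e3⟩ := pv_blockE (pvFormat08b n0) (pvFormat08b n1)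
      (pvFormat08b n2) (List.replicate (32 - P) '0')
      hF0 hF1 hF2 (by simp only [List.length_replicate]; omega)
    simp only [List.append_assoc] at e0 e1 e2 e3 ⊢
    rw [e0, e1, e2, e3]
    simp only [PySem.List.pyGetD_ofNat', List.getD_cons_succ,
      List.getD_cons_zero]
    rw [pv_parse_full n0 hb0.1 hb0.2, pv_parse_full n1 hb1.1 hb1.2, pv_parse_full n2 hb2.1 hb2.2,
      pv_parse_zeros (32 - P) (by omega)]
    rw [show min (max ((P:Int) - 8 * 0) 0) 8 = 8 by omega,
      show min (max ((P:Int) - 8 * 1) 0) 8 = 8 by omega,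
      show min (max ((P:Int) - 8 * 2) 0) 8 = 8 by omega,
      show min (max ((P:Int) - 8 * 3) 0) 8 = (P:Int) - 24 by omega,
      show ((8:Int) - 8).toNat = 0 by decide]
    rw [show ((8:Int) - ((P:Int) - 24)).toNat = 32 - P by omega]
    rw [show (1 <<< 0 : Nat) = 1 by decide, Nat.cast_one, pv_div_one n0, pv_div_one n1,
      pv_div_one n2, pv_zero_div (32 - P)]

-- ===== VERDICT (by name: the statement is the Claim_ definition above) =====
theorem get_network_portion_spec : Claim_equal_get_network_portion := by
  intro ip sc sp _ hpre
  unfold Spec_get_network_portion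
  simp only [Pre_get_network_portion] at hpre
  obtain ⟨hlen, hparse, hbnd, hpfx, hfit⟩ := hpre
  rcases hsp : PySem.Chars.splitOn ip.toList ['.'] with _ | ⟨o0, t0⟩
  · rw [hsp] at hlen; simp at hlen
  rw [hsp] at hparse hbnd hfit
  obtain ⟨n0, hn0⟩ := Option.isSome_iff_exists.mp (hparse o0 (by simp))
  have hb0 := hbnd o0 (by simp); rw [hn0] at hb0; simp only [Option.getD_some] at hb0
  have hp0 : (0:Int) ≤ if sc = "classful" then (if n0 ≤ 127 then (8:Int) else if n0 ≤ 191 then 16 else 24) else sp.getD 0 := by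
    rcases hpfx with h | ⟨_, hge⟩
    · rw [if_pos h]; split_ifs <;> norm_num
    · split_ifs with h
      · norm_num
      · norm_num
      · norm_num
      · exact hge
  obtain ⟨P, hP⟩ : ∃ P : Nat,
      (if sc = "classful" then (if n0 ≤ 127 then (8:Int) else if n0 ≤ 191 then 16 else 24) else sp.getD 0) = (P:Int) :=
    ⟨_, (Int.toNat_of_nonneg hp0).symm⟩
  simp only [List.getD_cons_zero, hn0, Option.getD_some, hP] at hfit
  rcases t0 with _ | ⟨o1, t1⟩
  · -- one octet
    simp only [get_network_portion, get_network_portion_alt, hsp, List.map_cons, List.map_nil,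
      List.flatten_cons, List.flatten_nil, List.append_nil, List.cons_append, List.nil_append,
      PySem.List.pyGetD_zero_cons, hn0, Option.getD_some, hP]
    rw [show List.take 4 [n0, (0:Int), 0, 0, 0] = [n0, 0, 0, 0] from rfl]
    refine pv_core1 n0 P hb0 ?_
    rcases hfit with h4 | hlt
    · simp at h4
    · simp at hlt; exact_mod_cast hlt
  rcases t1 with _ | ⟨o2, t2⟩
  · -- two octets
    obtain ⟨n1, hn1⟩ := Option.isSome_iff_exists.mp (hparse o1 (by simp))
    have hb1 := hbnd o1 (by simp); rw [hn1] at hb1; simp only [Option.getD_some] at hb1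
    simp only [get_network_portion, get_network_portion_alt, hsp, List.map_cons, List.map_nil,
      List.flatten_cons, List.flatten_nil, List.append_nil, List.cons_append, List.nil_append,
      PySem.List.pyGetD_zero_cons, hn0, hn1, Option.getD_some, hP]
    rw [show List.take 4 [n0, n1, (0:Int), 0, 0, 0] = [n0, n1, 0, 0] from rfl]
    refine pv_core2 n0 n1 P hb0 hb1 ?_
    rcases hfit with h4 | hlt
    · simp at h4
    · simp at hlt; exact_mod_cast hlt
  rcases t2 with _ | ⟨o3, rest⟩
  · -- three octets
    obtain ⟨n1, hn1⟩ := Option.isSome_iff_exists.mp (hparse o1 (by simp))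
    have hb1 := hbnd o1 (by simp); rw [hn1] at hb1; simp only [Option.getD_some] at hb1
    obtain ⟨n2, hn2⟩ := Option.isSome_iff_exists.mp (hparse o2 (by simp))
    have hb2 := hbnd o2 (by simp); rw [hn2] at hb2; simp only [Option.getD_some] at hb2
    simp only [get_network_portion, get_network_portion_alt, hsp, List.map_cons, List.map_nil,
      List.flatten_cons, List.flatten_nil, List.append_nil, List.cons_append, List.nil_append,
      PySem.List.pyGetD_zero_cons, hn0, hn1, hn2, Option.getD_some, hP]
    rw [show List.take 4 [n0, n1, n2, (0:Int), 0, 0, 0] = [n0, n1, n2, 0] from rfl]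
    refine pv_core3 n0 n1 n2 P hb0 hb1 hb2 ?_
    rcases hfit with h4 | hlt
    · simp at h4
    · simp at hlt; exact_mod_cast hlt
  · -- four or more octets
    obtain ⟨n1, hn1⟩ := Option.isSome_iff_exists.mp (hparse o1 (by simp))
    have hb1 := hbnd o1 (by simp); rw [hn1] at hb1; simp only [Option.getD_some] at hb1
    obtain ⟨n2, hn2⟩ := Option.isSome_iff_exists.mp (hparse o2 (by simp))
    have hb2 := hbnd o2 (by simp); rw [hn2] at hb2; simp only [Option.getD_some] at hb2
    obtain ⟨n3, hn3⟩ := Option.isSome_iff_exists.mp (hparse o3 (by simp))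
    have hb3 := hbnd o3 (by simp); rw [hn3] at hb3; simp only [Option.getD_some] at hb3
    simp only [get_network_portion, get_network_portion_alt, hsp, List.map_cons,
      List.flatten_cons, List.cons_append,
      PySem.List.pyGetD_zero_cons, hn0, hn1, hn2, hn3, Option.getD_some, hP]
    rw [show ∀ r : List Int, List.take 4 (n0 :: n1 :: n2 :: n3 :: (r ++ [0, 0, 0, 0])) = [n0, n1, n2, n3] from ?_]
    · exact pv_core n0 n1 n2 n3 _ [] P hb0 hb1 hb2 hb3
    · intro r; rfl
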